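-- pv_equiv track=rewrite | github.com/paiv/aoc2016 | code/17-2-vault/solve.py | render_path
-- ===== SOURCE A (Python) =====
-- def render_path(orig, path):
--     x, y = orig
--     res = [orig]
--     for mov in path:
--         if mov == 'U':
--             y -= 1
--         elif mov == 'D':
--             y += 1
--         elif mov == 'L':
--             x -= 1
--         elif mov == 'R':
--             x += 1
--         res.append((x, y))
--     return res
-- ===== SOURCE B (Python) =====
-- def render_path(orig, path):
--     x, y = orig
--     # Each point is computed independently from scratch: the i-th coordinate is
--     # the origin shifted by the counts of each move letter in the prefix path[:i].
--     return [
--         (x + path.count('R', 0, i) - path.count('L', 0, i),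
--          y + path.count('D', 0, i) - path.count('U', 0, i))
--         for i in range(len(path) + 1)
--     ]
-- ===== Notes on version B (the rewrite author's own statement) =====
-- stated objective: alternative
-- what changed: Instead of a single pass carrying running x/y state, B computes each output point independently by a closed form - origin plus the counts of 'R'/'L'/'D'/'U' in the path prefix before that index - trading A's O(n) accumulator loop for stateless O(n^2) prefix counting.
import Mathlib
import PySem

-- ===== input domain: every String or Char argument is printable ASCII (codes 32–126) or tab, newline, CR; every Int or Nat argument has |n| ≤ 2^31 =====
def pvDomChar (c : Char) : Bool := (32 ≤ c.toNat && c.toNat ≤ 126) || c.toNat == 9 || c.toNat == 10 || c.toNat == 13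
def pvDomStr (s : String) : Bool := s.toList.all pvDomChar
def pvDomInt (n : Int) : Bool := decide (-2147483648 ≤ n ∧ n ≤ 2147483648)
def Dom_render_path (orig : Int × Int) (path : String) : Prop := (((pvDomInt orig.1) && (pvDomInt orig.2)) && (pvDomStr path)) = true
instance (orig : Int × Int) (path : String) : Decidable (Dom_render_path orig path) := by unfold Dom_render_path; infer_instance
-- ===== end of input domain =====

-- B drops A's running x/y state entirely: each point is the origin plus the letter counts
-- of the path prefix before its index (closed form per point; alternative, not faster).

-- ===== PORT A =====
-- the for-loop of A: state is (x, y) and the accumulated res list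
def renderLoopA (x y : Int) (res : List (Int × Int)) (cs : List Char) : List (Int × Int) :=
  match cs with
  | [] => res
  | mov :: rest =>
      let y := if mov = 'U' then y - 1 else y
      let y := if mov = 'D' then y + 1 else y
      let x := if mov = 'L' then x - 1 else x
      let x := if mov = 'R' then x + 1 else x
      renderLoopA x y (res ++ [(x, y)]) rest

def render_path (orig : Int × Int) (path : String) : List (Int × Int) :=
  renderLoopA orig.1 orig.2 [orig] path.toList

-- ===== PORT B =====
-- path.count(c, 0, i) = number of occurrences of c in the prefix of length i (exact)
def pvPrefCount (cs : List Char) (i : Nat) (c : Char) : Int :=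
  ((cs.take i).count c : Int)

-- the list comprehension over range(len(path)+1)
def render_path_alt (orig : Int × Int) (path : String) : List (Int × Int) :=
  (List.range (path.toList.length + 1)).map (fun i =>
    (orig.1 + pvPrefCount path.toList i 'R' - pvPrefCount path.toList i 'L',
     orig.2 + pvPrefCount path.toList i 'D' - pvPrefCount path.toList i 'U'))

-- ===== PRECONDITION & SPEC =====
def Spec_render_path (orig : Int × Int) (path : String) (out : List (Int × Int)) : Prop := out = render_path_alt orig path
instance (orig : Int × Int) (path : String) (out : List (Int × Int)) : Decidable (Spec_render_path orig path out) := by unfold Spec_render_path; infer_instance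

-- ===== CLAIM (what is proved, stated in full; the proofs are below) =====
def Claim_equal_render_path : Prop := ∀ (orig : Int × Int) (path : String), Dom_render_path orig path → Spec_render_path orig path (render_path orig path)

-- ===== LEMMAS AND PROOFS =====

-- the point B computes at index i
def pvPoint (x y : Int) (cs : List Char) (i : Nat) : Int × Int :=
  (x + pvPrefCount cs i 'R' - pvPrefCount cs i 'L',
   y + pvPrefCount cs i 'D' - pvPrefCount cs i 'U')

theorem pvPrefCount_cons (mov : Char) (cs : List Char) (i : Nat) (c : Char) :
    pvPrefCount (mov :: cs) (i + 1) c
      = pvPrefCount cs i c + pvPrefCount (mov :: cs) 1 c := by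
  unfold pvPrefCount
  simp only [List.take_succ_cons, List.take_zero, List.count_cons, List.count_nil, beq_iff_eq]
  split_ifs <;> push_cast <;> ring

-- after one step, B's closed form over the whole path equals the closed form over the rest
theorem pvPoint_shift (x y : Int) (mov : Char) (cs : List Char) (i : Nat) :
    pvPoint x y (mov :: cs) (i + 1)
      = pvPoint (pvPoint x y (mov :: cs) 1).1 (pvPoint x y (mov :: cs) 1).2 cs i := by
  simp only [pvPoint]
  rw [pvPrefCount_cons mov cs i 'R', pvPrefCount_cons mov cs i 'L',
      pvPrefCount_cons mov cs i 'D', pvPrefCount_cons mov cs i 'U']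
  simp only [Prod.mk.injEq]
  constructor <;> ring

theorem renderLoopA_eq_map (cs : List Char) (x y : Int) (res : List (Int × Int)) :
    renderLoopA x y res cs
      = res ++ (List.range cs.length).map (fun i => pvPoint x y cs (i + 1)) := by
  induction cs generalizing x y res with
  | nil => simp [renderLoopA]
  | cons mov rest ih =>
      have hstep :
          ((if mov = 'R' then (if mov = 'L' then x - 1 else x) + 1 else if mov = 'L' then x - 1 else x,
            if mov = 'D' then (if mov = 'U' then y - 1 else y) + 1 else if mov = 'U' then y - 1 else y)
            : Int × Int)
            = pvPoint x y (mov :: rest) 1 := by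
        simp only [pvPoint, pvPrefCount, List.take_succ_cons, List.take_zero, List.count_cons,
          List.count_nil, beq_iff_eq, Prod.mk.injEq]
        constructor <;> split_ifs <;> simp_all
      simp only [renderLoopA]
      rw [ih, List.length_cons, List.range_succ_eq_map, List.map_cons, List.map_map,
        List.append_assoc, List.singleton_append]
      congr 1
      rw [hstep]
      congr 1
      apply List.map_congr_left
      intro i _
      simp only [Function.comp_apply, Nat.succ_eq_add_one]
      rw [pvPoint_shift, ← hstep]

-- ===== VERDICT (by name: the statement is the Claim_ definition above) =====
theorem render_path_spec : Claim_equal_render_path := by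
  intro orig path _
  unfold Spec_render_path render_path render_path_alt
  rw [renderLoopA_eq_map]
  show [orig] ++ (List.range path.toList.length).map (fun i => pvPoint orig.1 orig.2 path.toList (i + 1))
      = (List.range (path.toList.length + 1)).map (fun i => pvPoint orig.1 orig.2 path.toList i)
  have hhead : orig = pvPoint orig.1 orig.2 path.toList 0 := by
    simp [pvPoint, pvPrefCount]
  rw [List.range_succ_eq_map, List.map_cons, List.map_map, List.singleton_append, ← hhead]
  rfl
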